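-- pv_equiv track=rewrite | github.com/benjello/conversion_precis_ipp | quarto/tex2qmd/convert.py | extract_tex_comments
-- ===== SOURCE A (Python) =====
-- def extract_tex_comments(tex_content: str) -> list[tuple[str, str]]:
--     """Extract full-line LaTeX comments and the anchor (next non-comment line) for positioning.
--
--     Returns list of (comment_block, anchor). Consecutive % lines are merged into one block.
--     Anchor is the next non-empty, non-comment line (stripped, truncated to 70 chars) for
--     insertion before that text in the QMD. Empty anchor means comment was at end of file.
--     """
--     lines = tex_content.splitlines()
--     result: list[tuple[str, str]] = []
--     i = 0
--     while i < len(lines):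
--         line = lines[i]
--         stripped = line.strip()
--         if not stripped.startswith("%"):
--             i += 1
--             continue
--         # Start of a comment block: collect consecutive % lines
--         block_lines: list[str] = []
--         while i < len(lines) and lines[i].strip().startswith("%"):
--             raw = lines[i]
--             # Strip leading whitespace and single %
--             s = raw.lstrip()
--             if s.startswith("%"):
--                 # Remove one or more % and optional space
--                 rest = s.lstrip("%").lstrip()
--                 block_lines.append(rest)
--             i += 1
--         comment_text = "\n".join(block_lines).strip()
--         if not comment_text:
--             continue
--         # Anchor: next non-empty, non-comment line
--         anchor = ""
--         while i < len(lines):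
--             next_line = lines[i].strip()
--             if next_line and not next_line.startswith("%"):
--                 anchor = next_line[:70].strip()
--                 break
--             i += 1
--         result.append((comment_text, anchor))
--     return result
-- ===== SOURCE B (Python) =====
-- def extract_tex_comments(tex_content: str) -> list[tuple[str, str]]:
--     """Table-driven re-implementation: one backward pass precomputes, for every
--     index, the next anchor line (text and position); the forward pass groups
--     comment runs and reads anchors from the table instead of rescanning."""
--     lines = tex_content.splitlines()
--     n = len(lines)
--     # tab[i] = (anchor text, anchor position) of the first non-empty,
--     # non-comment line at index >= i; ("", n) if there is none.
--     tab = [("", n)] * (n + 1)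
--     cur = ("", n)
--     for i in range(n - 1, -1, -1):
--         s = lines[i].strip()
--         if s and not s.startswith("%"):
--             cur = (s[:70].strip(), i)
--         tab[i] = cur
--     result: list[tuple[str, str]] = []
--     i = 0
--     while i < n:
--         if not lines[i].strip().startswith("%"):
--             i += 1
--             continue
--         j = i
--         while j < n and lines[j].strip().startswith("%"):
--             j += 1
--         text = "\n".join(l.lstrip().lstrip("%").lstrip() for l in lines[i:j]).strip()
--         if not text:
--             i = j
--             continue
--         anchor, pos = tab[j]
--         result.append((text, anchor))
--         i = pos
--     return result
-- ===== Notes on version B (the rewrite author's own statement) =====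
-- stated objective: alternative
-- what changed: Replaces A's interleaved forward anchor-scan with a backward pass that precomputes a next-anchor table (text and position) for every index, and groups comment runs by finding the run end and mapping an extraction over the slice instead of conditionally accumulating inside the scan.
import Mathlib
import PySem

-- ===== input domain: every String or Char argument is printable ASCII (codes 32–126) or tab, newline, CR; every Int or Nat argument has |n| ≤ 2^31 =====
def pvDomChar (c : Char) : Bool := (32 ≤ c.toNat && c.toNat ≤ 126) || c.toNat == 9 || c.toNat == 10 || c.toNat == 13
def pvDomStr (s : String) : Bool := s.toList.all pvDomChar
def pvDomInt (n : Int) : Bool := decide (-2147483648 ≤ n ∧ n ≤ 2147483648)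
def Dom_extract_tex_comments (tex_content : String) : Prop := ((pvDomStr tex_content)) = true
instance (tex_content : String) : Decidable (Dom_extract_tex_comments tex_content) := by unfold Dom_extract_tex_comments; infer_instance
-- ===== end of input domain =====

-- B replaces A's interleaved forward anchor scan with a precomputed next-anchor table
-- (one backward pass) and extracts each comment run by slicing up to its end; same values, same cost.

-- ===== PORT A =====
-- line.strip().startswith("%")
def pvIsCmt (l : List Char) : Bool := PySem.Chars.startswith (PySem.Chars.strip l) ['%']

-- the inner 'while i < len(lines) and lines[i].strip().startswith("%")' block-collecting loop of A
def pvCollectA (lines : List (List Char)) (i : Nat) (acc : List (List Char)) :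
    List (List Char) × Nat :=
  if h : i < lines.length then
    if pvIsCmt lines[i] then
      let s := PySem.Chars.lstrip lines[i]
      -- s.lstrip("%") is exactly dropWhile (· == '%') for the single-char set "%"
      let acc' := if PySem.Chars.startswith s ['%'] then
          acc ++ [PySem.Chars.lstrip (s.dropWhile (· == '%'))]
        else acc
      pvCollectA lines (i + 1) acc'
    else (acc, i)
  else (acc, i)
termination_by lines.length - i

-- A's anchor-searching 'while i < len(lines)' loop; returns (anchor, final i)
def pvAnchorA (lines : List (List Char)) (i : Nat) : List Char × Nat :=
  if h : i < lines.length then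
    let nl := PySem.Chars.strip lines[i]
    if !nl.isEmpty && !PySem.Chars.startswith nl ['%'] then
      (PySem.Chars.strip (PySem.Chars.slice nl none (some 70)), i)
    else pvAnchorA lines (i + 1)
  else ([], i)
termination_by lines.length - i

-- A's outer 'while i < len(lines)' loop; fuel only makes it total (i strictly increases,
-- so lines.length + 1 steps always suffice)
def pvLoopA (lines : List (List Char)) (fuel i : Nat) : List (String × String) :=
  match fuel with
  | 0 => []
  | fuel + 1 =>
    if h : i < lines.length then
      if !pvIsCmt lines[i] then pvLoopA lines fuel (i + 1)
      else
        let r := pvCollectA lines i []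
        let text := PySem.Chars.strip (PySem.Chars.join ['\n'] r.1)
        if text.isEmpty then pvLoopA lines fuel r.2
        else
          let a := pvAnchorA lines r.2
          (String.ofList text, String.ofList a.1) :: pvLoopA lines fuel a.2
    else []

def extract_tex_comments (tex_content : String) : List (String × String) :=
  let lines := PySem.Chars.splitlines tex_content.toList
  pvLoopA lines (lines.length + 1) 0

-- ===== PORT B =====
-- l.lstrip().lstrip("%").lstrip()  (lstrip("%") = dropWhile (· == '%'), exact for the one-char set)
def pvExtract (l : List Char) : List Char :=
  PySem.Chars.lstrip ((PySem.Chars.lstrip l).dropWhile (· == '%'))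

-- B's backward table pass: 'for i in range(n-1, -1, -1)' carrying cur and writing tab[i] = cur;
-- writing at descending i into the preallocated array = consing onto the suffix already written,
-- starting from the sentinel entry tab[n] = ("", n)
def pvTabB (lines : List (List Char)) : List (List Char × Nat) :=
  ((PySem.List.pyRange ((lines.length : Int) - 1) (-1) (-1)).foldl
      (fun st i =>
        let s := PySem.Chars.strip (PySem.List.pyGetD lines i [])
        let cur := if !s.isEmpty && !PySem.Chars.startswith s ['%'] then
            (PySem.Chars.strip (PySem.Chars.slice s none (some 70)), i.toNat)
          else st.1
        (cur, cur :: st.2))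
      (([], lines.length), [([], lines.length)])).2

-- B's inner 'while j < n and lines[j].strip().startswith("%")' that only advances j
def pvRunEnd (lines : List (List Char)) (j : Nat) : Nat :=
  if h : j < lines.length then
    if pvIsCmt lines[j] then pvRunEnd lines (j + 1) else j
  else j
termination_by lines.length - j

-- B's forward 'while i < n' loop reading anchors from the table (fuel as in pvLoopA)
def pvLoopB (lines : List (List Char)) (tab : List (List Char × Nat)) (fuel i : Nat) :
    List (String × String) :=
  match fuel with
  | 0 => []
  | fuel + 1 =>
    if h : i < lines.length then
      if !pvIsCmt lines[i] then pvLoopB lines tab fuel (i + 1)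
      else
        let j := pvRunEnd lines i
        let text := PySem.Chars.strip (PySem.Chars.join ['\n']
          ((PySem.List.slice lines (some (i : Int)) (some (j : Int))).map pvExtract))
        if text.isEmpty then pvLoopB lines tab fuel j
        else
          let a := tab.getD j ([], lines.length)
          (String.ofList text, String.ofList a.1) :: pvLoopB lines tab fuel a.2
    else []

def extract_tex_comments_alt (tex_content : String) : List (String × String) :=
  let lines := PySem.Chars.splitlines tex_content.toList
  pvLoopB lines (pvTabB lines) (lines.length + 1) 0

-- ===== PRECONDITION & SPEC =====
def Spec_extract_tex_comments (tex_content : String) (out : List (String × String)) : Prop := out = extract_tex_comments_alt tex_content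
instance (tex_content : String) (out : List (String × String)) : Decidable (Spec_extract_tex_comments tex_content out) := by unfold Spec_extract_tex_comments; infer_instance

-- ===== CLAIM (what is proved, stated in full; the proofs are below) =====
def Claim_equal_extract_tex_comments : Prop := ∀ (tex_content : String), Dom_extract_tex_comments tex_content → Spec_extract_tex_comments tex_content (extract_tex_comments tex_content)

-- ===== LEMMAS AND PROOFS =====

-- abstract "next anchor from index b" on the suffix of lines starting at b
def pvAnkr : List (List Char) → Nat → Nat → List Char × Nat
  | [], _, n => ([], n)
  | l :: ls, b, n =>
    let s := PySem.Chars.strip l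
    if !s.isEmpty && !PySem.Chars.startswith s ['%'] then
      (PySem.Chars.strip (PySem.Chars.slice s none (some 70)), b)
    else pvAnkr ls (b + 1) n

-- A's anchor scan computes pvAnkr on the remaining suffix
theorem pvAnchorA_eq (lines : List (List Char)) (i : Nat) (hi : i ≤ lines.length) :
    pvAnchorA lines i = pvAnkr (lines.drop i) i lines.length := by
  fun_induction pvAnchorA lines i with
  | case1 i h nl hgood =>
    rw [List.drop_eq_getElem_cons h]
    simp only [Bool.and_eq_true, Bool.not_eq_true', List.isEmpty_eq_false_iff] at hgood
    have h1 : ¬ PySem.Chars.strip lines[i] = [] := hgood.1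
    have h2 : PySem.Chars.startswith (PySem.Chars.strip lines[i]) ['%'] = false := hgood.2
    simp [pvAnkr, h1, h2]
    rfl
  | case2 i h nl hgood ih =>
    rw [List.drop_eq_getElem_cons h]
    simp only [pvAnkr]
    rw [if_neg hgood]
    exact ih (by omega)
  | case3 i h =>
    have hd : lines.drop i = [] := List.drop_eq_nil_of_le (by omega)
    have hil : i = lines.length := by omega
    rw [hd]
    simp [pvAnkr, hil]


-- the index list of Source B's backward loop, in closed form
def pvD (m : Nat) : List Int := (List.range m).map (fun (k : Nat) => (m : Int) - 1 - (k : Int))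

theorem pvD_succ (m : Nat) : pvD (m + 1) = (m : Int) :: pvD m := by
  unfold pvD
  rw [List.range_succ_eq_map, List.map_cons, List.map_map]
  congr 1
  · push_cast; ring
  · apply List.map_congr_left
    intro k _
    simp [Function.comp]
    ring

theorem pvDesc (n : Nat) : PySem.List.pyRange ((n : Int) - 1) (-1) (-1) = pvD n := by
  unfold PySem.List.pyRange pvD
  rw [if_neg (by norm_num)]
  rw [if_neg (by norm_num)]
  rcases Nat.eq_zero_or_pos n with h | h
  · subst h; norm_num
  · rw [if_pos (by omega)]
    have hc : (((n : Int) - 1 - -1 + - -1 - 1) / - -1).toNat = n := by push_cast; omega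
    rw [hc]
    apply List.map_congr_left
    intro k _
    ring

-- the table of next anchors for indices m..lines.length
def pvTabFrom (lines : List (List Char)) (m : Nat) : List (List Char × Nat) :=
  (List.range' m (lines.length + 1 - m)).map (fun j => pvAnkr (lines.drop j) j lines.length)

theorem pvFold (lines : List (List Char)) (m : Nat) (hm : m ≤ lines.length)
    (st : (List Char × Nat) × List (List Char × Nat))
    (h1 : st.1 = pvAnkr (lines.drop m) m lines.length)
    (h2 : st.2 = pvTabFrom lines m) :
    (pvD m).foldl
      (fun st i =>
        let s := PySem.Chars.strip (PySem.List.pyGetD lines i [])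
        let cur := if !s.isEmpty && !PySem.Chars.startswith s ['%'] then
            (PySem.Chars.strip (PySem.Chars.slice s none (some 70)), i.toNat)
          else st.1
        (cur, cur :: st.2)) st
    = (pvAnkr lines 0 lines.length, pvTabFrom lines 0) := by
  induction m generalizing st with
  | zero =>
    simp only [pvD, List.range_zero, List.map_nil, List.foldl_nil]
    exact Prod.ext (by simpa using h1) (by simpa using h2)
  | succ m ih =>
    rw [pvD_succ, List.foldl_cons]
    apply ih (by omega)
    · -- first component of one step
      have hm' : m < lines.length := by omega
      simp only []
      rw [PySem.List.pyGetD_natCast, List.getD_eq_getElem?_getD, List.getElem?_eq_getElem hm']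
      rw [List.drop_eq_getElem_cons hm']
      simp only [pvAnkr, Int.toNat_natCast, Option.getD_some]
      rw [h1]
    · -- second component of one step
      have hm' : m < lines.length := by omega
      simp only []
      rw [h2]
      unfold pvTabFrom
      have hr : lines.length + 1 - m = (lines.length - m) + 1 := by omega
      rw [hr, List.range'_succ, List.map_cons]
      congr 1
      · rw [PySem.List.pyGetD_natCast, List.getD_eq_getElem?_getD, List.getElem?_eq_getElem hm']
        rw [List.drop_eq_getElem_cons hm']
        simp only [pvAnkr, Int.toNat_natCast, Option.getD_some]
        rw [h1]
      · have he : lines.length + 1 - (m + 1) = lines.length - m := by omega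
        rw [he]

theorem pvTabB_eq (lines : List (List Char)) :
    pvTabB lines = pvTabFrom lines 0 := by
  unfold pvTabB
  rw [pvDesc, pvFold lines lines.length le_rfl _ (by simp [pvAnkr]) ?h2]
  case h2 =>
    unfold pvTabFrom
    simp [pvAnkr]

-- table entries: tab = [pvAnkr (drop j) j n | j = 0..n]
theorem pvTabB_getD (lines : List (List Char)) (j : Nat) (hj : j ≤ lines.length) :
    (pvTabB lines).getD j ([], lines.length) = pvAnkr (lines.drop j) j lines.length := by
  rw [pvTabB_eq]
  unfold pvTabFrom
  rw [List.getD_eq_getElem?_getD, List.getElem?_map]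
  rw [List.getElem?_range' (by omega)]
  simp


theorem pvRunEnd_bounds (lines : List (List Char)) (i : Nat) (hi : i ≤ lines.length) :
    i ≤ pvRunEnd lines i ∧ pvRunEnd lines i ≤ lines.length := by
  fun_induction pvRunEnd lines i with
  | case1 i h hc ih => have := ih (by omega); omega
  | case2 i h hc => omega
  | case3 i h => omega

-- strip l starts with '%' → lstrip l starts with '%'
theorem pvIsCmt_lstrip {l : List Char} (h : pvIsCmt l = true) :
    PySem.Chars.startswith (PySem.Chars.lstrip l) ['%'] = true := by
  unfold pvIsCmt at h
  rw [PySem.Chars.startswith_iff] at h ⊢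
  have hsuf : PySem.Chars.strip l <+: PySem.Chars.lstrip l := by
    have h1 : List.dropWhile PySem.Chars.isspace (PySem.Chars.lstrip l).reverse <:+
        (PySem.Chars.lstrip l).reverse := List.dropWhile_suffix _
    rw [← List.reverse_prefix] at h1
    simpa [PySem.Chars.strip, PySem.Chars.rstrip] using h1
  exact h.trans hsuf

-- A's collector = map pvExtract over the comment run, ending at pvRunEnd
theorem pvCollectA_eq (lines : List (List Char)) (i : Nat) (acc : List (List Char)) :
    pvCollectA lines i acc =
      (acc ++ (PySem.List.slice lines (some (i : Int)) (some (pvRunEnd lines i : Int))).map pvExtract,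
       pvRunEnd lines i) := by
  fun_induction pvCollectA lines i acc with
  | case1 i acc h hc s acc' ih =>
    have hsw := pvIsCmt_lstrip hc
    have hr : pvRunEnd lines i = pvRunEnd lines (i + 1) := by
      rw [pvRunEnd, dif_pos h, if_pos hc]
    have hb1 : i + 1 ≤ pvRunEnd lines (i + 1) :=
      (pvRunEnd_bounds lines (i + 1) (by omega)).1
    have hacc : acc' = acc ++ [pvExtract lines[i]] := by
      simp only [acc', pvExtract]
      rw [dif_pos hsw]
    have hslice : PySem.List.slice lines (some (i : Int)) (some ((pvRunEnd lines (i + 1) : Nat) : Int)) =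
        lines[i] :: PySem.List.slice lines (some ((i + 1 : Nat) : Int)) (some ((pvRunEnd lines (i + 1) : Nat) : Int)) := by
      rw [PySem.List.slice_natCast, PySem.List.slice_natCast, List.drop_eq_getElem_cons h]
      have he : pvRunEnd lines (i + 1) - i = (pvRunEnd lines (i + 1) - (i + 1)) + 1 := by omega
      rw [he, List.take_succ_cons]
    rw [ih, hr, hslice, hacc]
    simp
  | case2 i acc h hc =>
    have hr : pvRunEnd lines i = i := by rw [pvRunEnd, dif_pos h, if_neg (by simp [hc])]
    rw [hr, PySem.List.slice_natCast]
    simp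
  | case3 i acc h =>
    have hr : pvRunEnd lines i = i := by rw [pvRunEnd, dif_neg h]
    rw [hr, PySem.List.slice_natCast]
    simp

theorem pvLoop_eq (lines : List (List Char)) (fuel i : Nat) :
    pvLoopA lines fuel i = pvLoopB lines (pvTabB lines) fuel i := by
  induction fuel generalizing i with
  | zero => rfl
  | succ fuel ih =>
    rw [pvLoopA, pvLoopB]
    by_cases h : i < lines.length
    · rw [dif_pos h, dif_pos h]
      by_cases hc : pvIsCmt lines[i] = true
      · simp only [hc, Bool.not_true, Bool.false_eq_true, if_false]
        have hre := pvRunEnd_bounds lines i (by omega)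
        simp only [pvCollectA_eq, List.nil_append]
        rw [pvAnchorA_eq lines _ hre.2, pvTabB_getD lines _ hre.2]
        split
        · exact ih _
        · rw [ih _]
      · simp only [hc, Bool.not_false, if_true]
        exact ih _
    · rw [dif_neg h, dif_neg h]

-- ===== VERDICT (by name: the statement is the Claim_ definition above) =====
theorem extract_tex_comments_spec : Claim_equal_extract_tex_comments := by
  intro s _
  unfold Spec_extract_tex_comments extract_tex_comments extract_tex_comments_alt
  exact pvLoop_eq _ _ _
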